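-- pv_equiv track=rewrite | github.com/greenwh/Placeholder5 | aerthos/systems/alignment.py | is_alignment_compatible
-- ===== SOURCE A (Python) =====
-- def is_alignment_compatible(alignment1: str, alignment2: str, strict: bool = False) -> bool:
--     """
--     Check if two alignments are compatible for party cohesion
--
--     In AD&D, certain alignments conflict:
--     - Good and Evil are opposed
--     - Law and Chaos are opposed (less strictly)
--
--     Args:
--         alignment1: First alignment
--         alignment2: Second alignment
--         strict: If True, law/chaos conflicts also matter
--
--     Returns:
--         True if alignments can cooperate, False if strongly opposed
--     """
--     # Same alignment = always compatible
--     if alignment1 == alignment2: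
--         return True
--
--     # Exact opposites on both axes = incompatible
--     opposites = [
--         ("Lawful Good", "Chaotic Evil"),
--         ("Chaotic Good", "Lawful Evil"),
--         ("Neutral Good", "Neutral Evil"),
--     ]
--
--     for a, b in opposites:
--         if (alignment1 == a and alignment2 == b) or (alignment1 == b and alignment2 == a):
--             return False
--
--     # Good and Evil are opposed
--     if ('Good' in alignment1 and 'Evil' in alignment2) or ('Evil' in alignment1 and 'Good' in alignment2):
--         return False
--
--     # In strict mode, Lawful and Chaotic also oppose
--     if strict:
--         if ('Lawful' in alignment1 and 'Chaotic' in alignment2) or ('Chaotic' in alignment1 and 'Lawful' in alignment2):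
--             # Unless one is neutral on the good/evil axis
--             if 'Neutral' not in alignment1 and 'Neutral' not in alignment2:
--                 return False
--
--     return True
-- ===== SOURCE B (Python) =====
-- def is_alignment_compatible(alignment1: str, alignment2: str, strict: bool = False) -> bool:
--     # Same alignment = always compatible
--     if alignment1 == alignment2:
--         return True
--     # Per-string axis flags; the Good/Evil axis check subsumes A's opposites table,
--     # since every pair in that table has 'Good' on one side and 'Evil' on the other.
--     g1, e1 = 'Good' in alignment1, 'Evil' in alignment1
--     g2, e2 = 'Good' in alignment2, 'Evil' in alignment2
--     if (g1 and e2) or (e1 and g2):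
--         return False
--     if strict:
--         l1, c1 = 'Lawful' in alignment1, 'Chaotic' in alignment1
--         l2, c2 = 'Lawful' in alignment2, 'Chaotic' in alignment2
--         if ((l1 and c2) or (c1 and l2)) and 'Neutral' not in alignment1 and 'Neutral' not in alignment2:
--             return False
--     return True
-- ===== Notes on version B (the rewrite author's own statement) =====
-- stated objective: simpler
-- what changed: B replaces A's opposites table plus ad-hoc substring checks by a per-string axis-flag decomposition; the table is dropped entirely since every pair in it is already caught by the Good/Evil substring check.
import Mathlib
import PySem

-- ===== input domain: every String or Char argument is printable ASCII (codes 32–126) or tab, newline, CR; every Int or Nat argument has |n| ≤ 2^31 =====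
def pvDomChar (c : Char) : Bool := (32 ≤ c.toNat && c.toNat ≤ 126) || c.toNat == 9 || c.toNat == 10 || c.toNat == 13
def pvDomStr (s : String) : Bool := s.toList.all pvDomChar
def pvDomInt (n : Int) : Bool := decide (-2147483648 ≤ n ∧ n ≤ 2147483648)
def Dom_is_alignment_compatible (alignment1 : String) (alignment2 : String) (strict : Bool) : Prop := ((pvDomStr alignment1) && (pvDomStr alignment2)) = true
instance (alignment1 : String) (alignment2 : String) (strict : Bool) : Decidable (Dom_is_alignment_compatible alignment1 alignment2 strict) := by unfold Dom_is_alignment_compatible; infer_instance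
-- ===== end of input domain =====

-- B drops A's redundant opposites table (each of its pairs is already caught by the
-- Good/Evil substring check) and tests per-string axis flags instead: simpler.

-- ===== PORT A =====
-- the 'for a, b in opposites: if … return False' loop, as structural recursion
def pvOppLoop (alignment1 : String) (alignment2 : String) : List (String × String) → Bool
  | [] => false
  | (a, b) :: rest =>
    if (alignment1 == a && alignment2 == b) || (alignment1 == b && alignment2 == a) then true
    else pvOppLoop alignment1 alignment2 rest

def pvOpposites : List (String × String) :=
  [("Lawful Good", "Chaotic Evil"), ("Chaotic Good", "Lawful Evil"), ("Neutral Good", "Neutral Evil")]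

def is_alignment_compatible (alignment1 : String) (alignment2 : String) (strict : Bool) : Bool :=
  if alignment1 == alignment2 then true
  else if pvOppLoop alignment1 alignment2 pvOpposites then false
  else if (PySem.Str.isIn "Good" alignment1 && PySem.Str.isIn "Evil" alignment2)
       || (PySem.Str.isIn "Evil" alignment1 && PySem.Str.isIn "Good" alignment2) then false
  else if strict then
    if (PySem.Str.isIn "Lawful" alignment1 && PySem.Str.isIn "Chaotic" alignment2)
       || (PySem.Str.isIn "Chaotic" alignment1 && PySem.Str.isIn "Lawful" alignment2) then
      if !PySem.Str.isIn "Neutral" alignment1 && !PySem.Str.isIn "Neutral" alignment2 then false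
      else true
    else true
  else true

-- ===== PORT B =====
def is_alignment_compatible_alt (alignment1 : String) (alignment2 : String) (strict : Bool) : Bool :=
  if alignment1 == alignment2 then true
  else
    let g1 := PySem.Str.isIn "Good" alignment1
    let e1 := PySem.Str.isIn "Evil" alignment1
    let g2 := PySem.Str.isIn "Good" alignment2
    let e2 := PySem.Str.isIn "Evil" alignment2
    if (g1 && e2) || (e1 && g2) then false
    else if strict then
      let l1 := PySem.Str.isIn "Lawful" alignment1
      let c1 := PySem.Str.isIn "Chaotic" alignment1
      let l2 := PySem.Str.isIn "Lawful" alignment2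
      let c2 := PySem.Str.isIn "Chaotic" alignment2
      if ((l1 && c2) || (c1 && l2)) && !PySem.Str.isIn "Neutral" alignment1
           && !PySem.Str.isIn "Neutral" alignment2 then false
      else true
    else true

-- ===== PRECONDITION & SPEC =====
def Spec_is_alignment_compatible (alignment1 : String) (alignment2 : String) (strict : Bool) (out : Bool) : Prop := out = is_alignment_compatible_alt alignment1 alignment2 strict
instance (alignment1 : String) (alignment2 : String) (strict : Bool) (out : Bool) : Decidable (Spec_is_alignment_compatible alignment1 alignment2 strict out) := by unfold Spec_is_alignment_compatible; infer_instance

-- ===== CLAIM (what is proved, stated in full; the proofs are below) =====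
def Claim_equal_is_alignment_compatible : Prop := ∀ (alignment1 : String) (alignment2 : String) (strict : Bool), Dom_is_alignment_compatible alignment1 alignment2 strict → Spec_is_alignment_compatible alignment1 alignment2 strict (is_alignment_compatible alignment1 alignment2 strict)

-- ===== LEMMAS AND PROOFS =====

-- If A's opposites loop fires, the Good/Evil substring check fires as well.
theorem pvOppLoop_imp_goodEvil (a1 a2 : String)
    (h : pvOppLoop a1 a2 pvOpposites = true) :
    ((PySem.Str.isIn "Good" a1 && PySem.Str.isIn "Evil" a2)
      || (PySem.Str.isIn "Evil" a1 && PySem.Str.isIn "Good" a2)) = true := by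
  simp only [pvOpposites, pvOppLoop] at h
  split_ifs at h with h1 h2 h3
  all_goals
    simp only [Bool.or_eq_true, Bool.and_eq_true, beq_iff_eq] at *
    rcases ‹_ ∨ _› with ⟨rfl, rfl⟩ | ⟨rfl, rfl⟩ <;> decide

theorem is_alignment_compatible_spec' (a1 a2 : String) (strict : Bool) :
    is_alignment_compatible a1 a2 strict = is_alignment_compatible_alt a1 a2 strict := by
  have key : ∀ (lc n1 n2 : Bool),
      (if lc then (if !n1 && !n2 then false else true) else true)
        = (if lc && !n1 && !n2 then false else true) := by decide
  unfold is_alignment_compatible is_alignment_compatible_alt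
  by_cases heq : a1 == a2
  · simp only [heq, if_true]
  · simp only [Bool.not_eq_true] at heq
    simp only [heq, Bool.false_eq_true, if_false]
    cases hl : pvOppLoop a1 a2 pvOpposites
    · simp only [Bool.false_eq_true, if_false]
      cases hge : ((PySem.Str.isIn "Good" a1 && PySem.Str.isIn "Evil" a2)
          || (PySem.Str.isIn "Evil" a1 && PySem.Str.isIn "Good" a2))
      · simp only [Bool.false_eq_true, if_false]
        cases strict
        · simp only [Bool.false_eq_true, if_false]
        · simp only [if_true]
          exact key _ _ _
      · simp only [if_true]
    · have hge := pvOppLoop_imp_goodEvil a1 a2 hl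
      simp only [hge, if_true]

-- ===== VERDICT (by name: the statement is the Claim_ definition above) =====
theorem is_alignment_compatible_spec : Claim_equal_is_alignment_compatible := by
  intro a1 a2 strict _
  exact is_alignment_compatible_spec' a1 a2 strict
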